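-- pv_equiv track=rewrite | github.com/dagoaty/AdventofCode2021 | day5/day5.py | getDiagonalPoints
-- ===== SOURCE A (Python) =====
-- from typing import List, Tuple, Dict
--
-- def getDiagonalPoints(x1: int, y1: int, x2: int, y2: int) -> List[Tuple[int, int]]:
--     points: List[Tuple[int, int]] = []
--     xpos = x1
--     ypos = y1
--     if x1 < x2: # Going Left to Right
--         if y1 < y2: # Going down
--             while ypos <= y2:
--                 points.append((xpos, ypos))
--                 xpos += 1
--                 ypos += 1
--         if y1 > y2: # Going up
--             while ypos >= y2:
--                 points.append((xpos, ypos))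
--                 xpos += 1
--                 ypos -= 1
--     if x1 > x2: # Going right to left
--         if y1 < y2: # Going down
--             while ypos <= y2:
--                 points.append((xpos, ypos))
--                 xpos -= 1
--                 ypos += 1
--         if y1 > y2: # Going up
--             while ypos >= y2:
--                 points.append((xpos, ypos))
--                 xpos -= 1
--                 ypos -= 1
--     return points
-- ===== SOURCE B (Python) =====
-- def _seg(x, y, dx, dy, n):
--     # points 0..n along direction (dx,dy) from (x,y), built by halving recursion
--     if n == 0:
--         return [(x, y)]
--     m = n // 2
--     return _seg(x, y, dx, dy, m) + _seg(x + (m + 1) * dx, y + (m + 1) * dy, dx, dy, n - m - 1)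
--
-- def getDiagonalPoints(x1: int, y1: int, x2: int, y2: int):
--     if x1 == x2 or y1 == y2:
--         return []
--     dx = 1 if x1 < x2 else -1
--     dy = 1 if y1 < y2 else -1
--     return _seg(x1, y1, dx, dy, abs(y2 - y1))
-- ===== Notes on version B (the rewrite author's own statement) =====
-- stated objective: alternative
-- what changed: Replaces the four comparison-driven one-step-at-a-time while-loops by a divide-and-conquer recursion: the segment (direction and length computed up front from the y-span) is split at its midpoint and the two halves are built recursively and concatenated.
import Mathlib
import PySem

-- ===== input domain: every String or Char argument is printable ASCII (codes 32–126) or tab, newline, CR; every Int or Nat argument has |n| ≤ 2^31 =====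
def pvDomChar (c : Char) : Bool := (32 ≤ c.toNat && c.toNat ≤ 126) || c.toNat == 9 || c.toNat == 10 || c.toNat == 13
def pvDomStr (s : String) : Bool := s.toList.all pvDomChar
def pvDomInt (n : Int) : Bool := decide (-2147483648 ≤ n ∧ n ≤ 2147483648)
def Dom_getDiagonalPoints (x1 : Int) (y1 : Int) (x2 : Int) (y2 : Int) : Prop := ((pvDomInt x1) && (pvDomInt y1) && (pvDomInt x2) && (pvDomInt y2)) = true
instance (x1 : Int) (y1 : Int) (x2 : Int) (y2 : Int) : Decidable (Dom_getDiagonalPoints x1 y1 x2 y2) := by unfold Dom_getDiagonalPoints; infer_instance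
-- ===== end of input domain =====

-- ===== PORT A =====
-- B builds the segment by divide-and-conquer (midpoint split + concatenation) instead of A's four one-step while-loops (objective: alternative).
-- while ypos <= y2: append; xpos += 1; ypos += 1
def pvLoopDD (xpos ypos y2 : Int) : List (Int × Int) :=
  if ypos ≤ y2 then (xpos, ypos) :: pvLoopDD (xpos + 1) (ypos + 1) y2 else []
termination_by (y2 + 1 - ypos).toNat
decreasing_by omega

-- while ypos >= y2: append; xpos += 1; ypos -= 1
def pvLoopDU (xpos ypos y2 : Int) : List (Int × Int) :=
  if ypos ≥ y2 then (xpos, ypos) :: pvLoopDU (xpos + 1) (ypos - 1) y2 else []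
termination_by (ypos + 1 - y2).toNat
decreasing_by omega

-- while ypos <= y2: append; xpos -= 1; ypos += 1
def pvLoopUD (xpos ypos y2 : Int) : List (Int × Int) :=
  if ypos ≤ y2 then (xpos, ypos) :: pvLoopUD (xpos - 1) (ypos + 1) y2 else []
termination_by (y2 + 1 - ypos).toNat
decreasing_by omega

-- while ypos >= y2: append; xpos -= 1; ypos -= 1
def pvLoopUU (xpos ypos y2 : Int) : List (Int × Int) :=
  if ypos ≥ y2 then (xpos, ypos) :: pvLoopUU (xpos - 1) (ypos - 1) y2 else []
termination_by (ypos + 1 - y2).toNat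
decreasing_by omega

def getDiagonalPoints (x1 : Int) (y1 : Int) (x2 : Int) (y2 : Int) : List (Int × Int) :=
  if x1 < x2 then
    if y1 < y2 then pvLoopDD x1 y1 y2
    else if y1 > y2 then pvLoopDU x1 y1 y2
    else []
  else if x1 > x2 then
    if y1 < y2 then pvLoopUD x1 y1 y2
    else if y1 > y2 then pvLoopUU x1 y1 y2
    else []
  else []

-- ===== PORT B =====
-- _seg: points 0..n along direction (dx,dy) from (x,y), built by halving recursion
def pvSeg (x y dx dy : Int) (n : Nat) : List (Int × Int) :=
  if h : n = 0 then [(x, y)]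
  else
    let m := n / 2
    pvSeg x y dx dy m ++ pvSeg (x + (m + 1) * dx) (y + (m + 1) * dy) dx dy (n - m - 1)
termination_by n
decreasing_by all_goals omega

def getDiagonalPoints_alt (x1 : Int) (y1 : Int) (x2 : Int) (y2 : Int) : List (Int × Int) :=
  if x1 = x2 ∨ y1 = y2 then []
  else
    let dx : Int := if x1 < x2 then 1 else -1
    let dy : Int := if y1 < y2 then 1 else -1
    pvSeg x1 y1 dx dy (y2 - y1).natAbs

-- ===== PRECONDITION & SPEC =====
def Spec_getDiagonalPoints (x1 : Int) (y1 : Int) (x2 : Int) (y2 : Int) (out : List (Int × Int)) : Prop := out = getDiagonalPoints_alt x1 y1 x2 y2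
instance (x1 : Int) (y1 : Int) (x2 : Int) (y2 : Int) (out : List (Int × Int)) : Decidable (Spec_getDiagonalPoints x1 y1 x2 y2 out) := by unfold Spec_getDiagonalPoints; infer_instance

-- ===== CLAIM (what is proved, stated in full; the proofs are below) =====
def Claim_equal_getDiagonalPoints : Prop := ∀ (x1 : Int) (y1 : Int) (x2 : Int) (y2 : Int), Dom_getDiagonalPoints x1 y1 x2 y2 → Spec_getDiagonalPoints x1 y1 x2 y2 (getDiagonalPoints x1 y1 x2 y2)

-- ===== LEMMAS AND PROOFS =====

theorem pvSeg_eq (x y dx dy : Int) (n : Nat) :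
    pvSeg x y dx dy n = (List.range (n + 1)).map (fun (i : Nat) => (x + (i : Int) * dx, y + (i : Int) * dy)) := by
  rw [pvSeg]
  split
  · subst ‹n = 0›; simp
  · have hm : n / 2 < n := by omega
    show pvSeg x y dx dy (n / 2) ++
        pvSeg (x + ((n / 2 : Nat) + 1) * dx) (y + ((n / 2 : Nat) + 1) * dy) dx dy (n - n / 2 - 1) = _
    rw [pvSeg_eq x y dx dy (n / 2),
        pvSeg_eq (x + ((n / 2 : Nat) + 1) * dx) (y + ((n / 2 : Nat) + 1) * dy) dx dy (n - n / 2 - 1)]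
    have hsplit : n + 1 = (n / 2 + 1) + (n - n / 2 - 1 + 1) := by omega
    conv_rhs => rw [hsplit, List.range_add]
    rw [List.map_append, List.map_map]
    congr 1
    apply List.map_congr_left
    intro i _
    simp only [Function.comp_apply, Prod.mk.injEq]
    push_cast
    constructor <;> ring
termination_by n
decreasing_by all_goals omega

theorem pvLoopDD_eq (x y y2 : Int) :
    pvLoopDD x y y2 = (List.range (y2 + 1 - y).toNat).map (fun (i : Nat) => (x + (i : Int), y + (i : Int))) := by
  rw [pvLoopDD]
  split
  · have hn : (y2 + 1 - y).toNat = (y2 + 1 - (y + 1)).toNat + 1 := by omega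
    rw [pvLoopDD_eq (x + 1) (y + 1) y2, hn, List.range_succ_eq_map]
    simp only [List.map_cons, List.map_map, List.cons.injEq, Prod.mk.injEq, Nat.cast_zero]
    refine ⟨⟨by omega, by omega⟩, List.map_congr_left ?_⟩
    intro i _
    simp only [Function.comp_apply, Prod.mk.injEq]
    push_cast
    constructor <;> ring
  · have hn : (y2 + 1 - y).toNat = 0 := by omega
    simp [hn]
termination_by (y2 + 1 - y).toNat
decreasing_by omega

theorem pvLoopDU_eq (x y y2 : Int) :
    pvLoopDU x y y2 = (List.range (y + 1 - y2).toNat).map (fun (i : Nat) => (x + (i : Int), y - (i : Int))) := by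
  rw [pvLoopDU]
  split
  · have hn : (y + 1 - y2).toNat = ((y - 1) + 1 - y2).toNat + 1 := by omega
    rw [pvLoopDU_eq (x + 1) (y - 1) y2, hn, List.range_succ_eq_map]
    simp only [List.map_cons, List.map_map, List.cons.injEq, Prod.mk.injEq, Nat.cast_zero]
    refine ⟨⟨by omega, by omega⟩, List.map_congr_left ?_⟩
    intro i _
    simp only [Function.comp_apply, Prod.mk.injEq]
    push_cast
    constructor <;> ring
  · have hn : (y + 1 - y2).toNat = 0 := by omega
    simp [hn]
termination_by (y + 1 - y2).toNat
decreasing_by omega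

theorem pvLoopUD_eq (x y y2 : Int) :
    pvLoopUD x y y2 = (List.range (y2 + 1 - y).toNat).map (fun (i : Nat) => (x - (i : Int), y + (i : Int))) := by
  rw [pvLoopUD]
  split
  · have hn : (y2 + 1 - y).toNat = (y2 + 1 - (y + 1)).toNat + 1 := by omega
    rw [pvLoopUD_eq (x - 1) (y + 1) y2, hn, List.range_succ_eq_map]
    simp only [List.map_cons, List.map_map, List.cons.injEq, Prod.mk.injEq, Nat.cast_zero]
    refine ⟨⟨by omega, by omega⟩, List.map_congr_left ?_⟩
    intro i _
    simp only [Function.comp_apply, Prod.mk.injEq]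
    push_cast
    constructor <;> ring
  · have hn : (y2 + 1 - y).toNat = 0 := by omega
    simp [hn]
termination_by (y2 + 1 - y).toNat
decreasing_by omega

theorem pvLoopUU_eq (x y y2 : Int) :
    pvLoopUU x y y2 = (List.range (y + 1 - y2).toNat).map (fun (i : Nat) => (x - (i : Int), y - (i : Int))) := by
  rw [pvLoopUU]
  split
  · have hn : (y + 1 - y2).toNat = ((y - 1) + 1 - y2).toNat + 1 := by omega
    rw [pvLoopUU_eq (x - 1) (y - 1) y2, hn, List.range_succ_eq_map]
    simp only [List.map_cons, List.map_map, List.cons.injEq, Prod.mk.injEq, Nat.cast_zero]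
    refine ⟨⟨by omega, by omega⟩, List.map_congr_left ?_⟩
    intro i _
    simp only [Function.comp_apply, Prod.mk.injEq]
    push_cast
    constructor <;> ring
  · have hn : (y + 1 - y2).toNat = 0 := by omega
    simp [hn]
termination_by (y + 1 - y2).toNat
decreasing_by omega

-- ===== VERDICT (by name: the statement is the Claim_ definition above) =====
theorem getDiagonalPoints_spec : Claim_equal_getDiagonalPoints := by
  intro x1 y1 x2 y2 _
  unfold Spec_getDiagonalPoints getDiagonalPoints getDiagonalPoints_alt
  by_cases hx : x1 < x2
  · by_cases hy : y1 < y2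
    · have hne : ¬ (x1 = x2 ∨ y1 = y2) := by omega
      have hn : (y2 - y1).natAbs + 1 = (y2 + 1 - y1).toNat := by omega
      simp only [hx, hy, hne, if_pos, if_true, if_false, if_neg, pvLoopDD_eq, pvSeg_eq, hn]
      apply List.map_congr_left
      intro i _
      simp only [Prod.mk.injEq]
      push_cast
      omega
    · by_cases hy2 : y1 > y2
      · have hne : ¬ (x1 = x2 ∨ y1 = y2) := by omega
        have hy' : ¬ y1 < y2 := by omega
        have hn : (y2 - y1).natAbs + 1 = (y1 + 1 - y2).toNat := by omega
        simp only [hx, hy, hy2, hne, hy', if_pos, if_true, if_false, if_neg, pvLoopDU_eq, pvSeg_eq, hn]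
        apply List.map_congr_left
        intro i _
        simp only [Prod.mk.injEq]
        push_cast
        omega
      · have heq : y1 = y2 := by omega
        simp [hx, heq]
  · by_cases hx2 : x1 > x2
    · by_cases hy : y1 < y2
      · have hne : ¬ (x1 = x2 ∨ y1 = y2) := by omega
        have hn : (y2 - y1).natAbs + 1 = (y2 + 1 - y1).toNat := by omega
        simp only [hx, hx2, hy, hne, if_pos, if_true, if_false, if_neg, pvLoopUD_eq, pvSeg_eq, hn]
        apply List.map_congr_left
        intro i _
        simp only [Prod.mk.injEq]
        push_cast
        omega
      · by_cases hy2 : y1 > y2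
        · have hne : ¬ (x1 = x2 ∨ y1 = y2) := by omega
          have hn : (y2 - y1).natAbs + 1 = (y1 + 1 - y2).toNat := by omega
          simp only [hx, hx2, hy, hy2, hne, if_pos, if_true, if_false, if_neg, pvLoopUU_eq, pvSeg_eq, hn]
          apply List.map_congr_left
          intro i _
          simp only [Prod.mk.injEq]
          push_cast
          omega
        · have heq : y1 = y2 := by omega
          simp [hx, hx2, heq]
    · have heq : x1 = x2 := by omega
      simp [hx, hx2, heq]
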